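-- pv_equiv track=rewrite | github.com/pypi-data/pypi-mirror-366 | packages/louieai/louieai-0.3.1.tar.gz/louieai-0.3.1/tests/unit/test_documentation.py | should_skip_code
-- ===== SOURCE A (Python) =====
-- def should_skip_code(code: str) -> bool:
--     """Determine if code block should be skipped."""
--     skip_patterns = [
--         "$ ",  # Shell commands
--         "pip install",
--         "uv pip",
--         "...",  # Incomplete code
--         "# TODO",
--     ]
--     return any(pattern in code for pattern in skip_patterns)
-- ===== SOURCE B (Python) =====
-- def should_skip_code(code: str) -> bool:
--     """Determine if code block should be skipped (single left-to-right scan)."""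
--     patterns = ("$ ", "pip install", "uv pip", "...", "# TODO")
--     for i in range(len(code)):
--         for p in patterns:
--             if code.startswith(p, i):
--                 return True
--     return False
-- ===== Notes on version B (the rewrite author's own statement) =====
-- stated objective: alternative
-- what changed: Replaced five independent substring-containment scans ('pattern in code' for each pattern) with a single left-to-right scan over the suffixes of code that tests each position once for a pattern prefix.
import Mathlib
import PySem

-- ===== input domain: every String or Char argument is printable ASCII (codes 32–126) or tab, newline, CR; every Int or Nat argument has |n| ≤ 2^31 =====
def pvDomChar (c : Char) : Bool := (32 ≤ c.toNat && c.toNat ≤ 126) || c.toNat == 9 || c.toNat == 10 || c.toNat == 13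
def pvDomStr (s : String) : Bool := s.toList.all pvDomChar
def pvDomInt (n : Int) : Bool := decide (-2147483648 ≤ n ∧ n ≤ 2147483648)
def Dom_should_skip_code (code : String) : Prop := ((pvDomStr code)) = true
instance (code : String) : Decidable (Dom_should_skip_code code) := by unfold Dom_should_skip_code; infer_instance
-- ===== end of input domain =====

-- B replaces five independent substring-containment scans by one left-to-right scan over the suffixes of code (objective: alternative).

-- ===== PORT A =====
-- the fixed pattern list of A (and B)
def pvSkipPatterns : List String := ["$ ", "pip install", "uv pip", "...", "# TODO"]

def should_skip_code (code : String) : Bool :=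
  pvSkipPatterns.any (fun pattern => PySem.Str.isIn pattern code)

-- ===== PORT B =====
-- the while-loop of Source B: walk the suffixes, test each position for a pattern prefix
def pvAltGo : List Char → Bool
  | [] => false
  | c :: rest =>
      if pvSkipPatterns.any (fun p => PySem.Chars.startswith (c :: rest) p.toList) then true
      else pvAltGo rest

def should_skip_code_alt (code : String) : Bool := pvAltGo code.toList

-- ===== PRECONDITION & SPEC =====
def Spec_should_skip_code (code : String) (out : Bool) : Prop := out = should_skip_code_alt code
instance (code : String) (out : Bool) : Decidable (Spec_should_skip_code code out) := by unfold Spec_should_skip_code; infer_instance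

-- ===== CLAIM (what is proved, stated in full; the proofs are below) =====
def Claim_equal_should_skip_code : Prop := ∀ (code : String), Dom_should_skip_code code → Spec_should_skip_code code (should_skip_code code)

-- ===== LEMMAS AND PROOFS =====
theorem pvAltGo_eq_any_infix (l : List Char) :
    pvAltGo l = pvSkipPatterns.any (fun p => decide (p.toList <:+: l)) := by
  induction l with
  | nil => decide
  | cons c rest ih =>
      simp only [pvAltGo, ih]
      by_cases h : pvSkipPatterns.any (fun p => PySem.Chars.startswith (c :: rest) p.toList) = true
      · simp only [h, if_true]
        rcases List.any_eq_true.mp h with ⟨p, hp, hpre⟩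
        refine (List.any_eq_true.mpr ⟨p, hp, ?_⟩).symm
        simp only [PySem.Chars.startswith] at hpre
        exact decide_eq_true ((List.isPrefixOf_iff_prefix.mp hpre).isInfix)
      · simp only [h, if_neg, Bool.false_eq_true, not_false_eq_true]
        rw [Bool.eq_iff_iff]
        simp only [List.any_eq_true, decide_eq_true_eq, List.infix_cons_iff]
        constructor
        · rintro ⟨p, hp, hi⟩; exact ⟨p, hp, Or.inr hi⟩
        · rintro ⟨p, hp, hpre | hi⟩
          · exact absurd (List.any_eq_true.mpr ⟨p, hp,
              by simpa [PySem.Chars.startswith] using List.isPrefixOf_iff_prefix.mpr hpre⟩) h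
          · exact ⟨p, hp, hi⟩

-- ===== VERDICT (by name: the statement is the Claim_ definition above) =====
theorem should_skip_code_spec : Claim_equal_should_skip_code := by
  intro code _
  unfold Spec_should_skip_code should_skip_code should_skip_code_alt
  rw [pvAltGo_eq_any_infix]
  rw [Bool.eq_iff_iff]
  simp only [List.any_eq_true, decide_eq_true_eq, PySem.Str.isIn_eq,
    PySem.Chars.isIn_iff_infix]
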